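-- pv_equiv track=rewrite | github.com/ConanMp/Metabolism_map_prediction_pipeline | calculate_probability_parallel_heterogenous_final2020.py | new_sort_cases_for_enzymes
-- ===== SOURCE A (Python) =====
-- def new_sort_cases_for_enzymes(enzymes_cases, sorted_cases, node_dependencies_dic):
--     output={}
--     for an_enzyme_case in enzymes_cases:
--         splited_enzyme_case=an_enzyme_case.split('\t')
--         present_enzyme=set([])
--         for enzyme in splited_enzyme_case:
--             if '~' not in enzyme:
--                 present_enzyme.add(enzyme)
--         new_sorted_case=[]
--         for case in sorted_cases:
--             keep_case=True
--             splitted_case=case.split('\t')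
--             present_node=set([])
--             for node in splitted_case:
--                 if '~' not in node:
--                     present_node.add(node)
--             for node in present_node:
--                 has_parent=False
--                 node_dependencies=node_dependencies_dic[node]
--                 for parent_tuple in node_dependencies:
--                     parent=parent_tuple[0]
--                     enzyme=parent_tuple[1]
--                     if parent=='0':
--                         if enzyme in present_enzyme:
--                             has_parent=True
--                             break
--                     else:
--                         if enzyme in present_enzyme and parent in present_node:
--                             has_parent=True
--                             break
--                 if not has_parent:
--                     keep_case=False
--                     break
--             if keep_case:
--                 new_sorted_case.append(case)
--         output[an_enzyme_case]=new_sorted_case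
--     return output
-- ===== SOURCE B (Python) =====
-- def new_sort_cases_for_enzymes(enzymes_cases, sorted_cases, node_dependencies_dic):
--     # Precompute once per case: its present-node set and, for each present node, the
--     # set of enzymes that could satisfy it given this case's present nodes.
--     table = []
--     for case in sorted_cases:
--         present = {t for t in case.split('\t') if '~' not in t}
--         reqs = [{e for (p, e) in node_dependencies_dic[n] if p == '0' or p in present}
--                 for n in present]
--         table.append((case, reqs))
--     output = {}
--     for an_enzyme_case in enzymes_cases:
--         present_enzyme = {t for t in an_enzyme_case.split('\t') if '~' not in t}
--         output[an_enzyme_case] = [case for case, reqs in table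
--                                   if all(any(e in present_enzyme for e in s) for s in reqs)]
--     return output
-- ===== Notes on version B (the rewrite author's own statement) =====
-- stated objective: faster
-- what changed: B precomputes, in one pass over sorted_cases, each case's present-node set and per-node satisfying-enzyme candidate sets (the parent condition, which does not depend on the enzyme case, is resolved there once); the per-enzyme loop then only tests enzyme membership against these precomputed sets, instead of re-splitting every case and re-running the full parent/enzyme dependency scan for every enzyme case.
-- outside the precondition, e.g. on new_sort_cases_for_enzymes([], ['a'], {}): A returns {}, B raises KeyError
import Mathlib
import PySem

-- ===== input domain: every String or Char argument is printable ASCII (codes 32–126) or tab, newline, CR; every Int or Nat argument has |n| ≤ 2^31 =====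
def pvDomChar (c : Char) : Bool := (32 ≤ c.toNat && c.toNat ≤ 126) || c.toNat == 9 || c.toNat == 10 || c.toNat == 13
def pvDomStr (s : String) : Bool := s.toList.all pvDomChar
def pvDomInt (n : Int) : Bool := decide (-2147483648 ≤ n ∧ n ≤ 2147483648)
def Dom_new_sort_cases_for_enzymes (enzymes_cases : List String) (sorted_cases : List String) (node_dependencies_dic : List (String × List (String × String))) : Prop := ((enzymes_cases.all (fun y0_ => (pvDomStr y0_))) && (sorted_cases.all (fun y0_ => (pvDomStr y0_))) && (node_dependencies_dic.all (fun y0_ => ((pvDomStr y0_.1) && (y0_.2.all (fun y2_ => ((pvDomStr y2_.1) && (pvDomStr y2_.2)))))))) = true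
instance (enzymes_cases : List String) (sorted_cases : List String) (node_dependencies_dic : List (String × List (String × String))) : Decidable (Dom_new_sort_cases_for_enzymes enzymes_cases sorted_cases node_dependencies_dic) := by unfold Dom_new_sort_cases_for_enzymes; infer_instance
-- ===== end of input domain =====

-- B precomputes each case's present-node set and per-node satisfying-enzyme candidate
-- sets once, so the per-enzyme loop only tests enzyme membership (objective: faster).


-- s.split('\t'): exact, since the separator "\t" is nonempty (split? is none only for sep = "")
def pvSplitTab (s : String) : List String := (PySem.Str.split? s "\t").getD []

-- ===== PORT A =====
-- A iterates its Python sets; here they carry insertion order. Under Pre_ (no KeyError)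
-- every value A computes from a set is order-independent, so this port is exact there.
def pvAPresent (s : String) : PySem.Set String :=
  (pvSplitTab s).foldl
    (fun acc tok => if PySem.Str.isIn "~" tok then acc else PySem.Set.add acc tok)
    PySem.Set.empty

def pvAhasParent (present_enzyme present_node : PySem.Set String) :
    List (String × String) → Bool
  | [] => false
  | parent_tuple :: rest =>
    if parent_tuple.1 == "0" then
      if PySem.Set.contains present_enzyme parent_tuple.2 then true
      else pvAhasParent present_enzyme present_node rest
    else
      if PySem.Set.contains present_enzyme parent_tuple.2
          && PySem.Set.contains present_node parent_tuple.1 then true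
      else pvAhasParent present_enzyme present_node rest

def pvAkeepCase (dic : PySem.Dict String (List (String × String)))
    (present_enzyme present_node : PySem.Set String) : List String → Bool
  | [] => true
  | node :: rest =>
    -- node_dependencies_dic[node]: KeyError (= none) is excluded by Pre_
    if pvAhasParent present_enzyme present_node ((dic.get? node).getD []) then
      pvAkeepCase dic present_enzyme present_node rest
    else false

def new_sort_cases_for_enzymes (enzymes_cases : List String) (sorted_cases : List String)
    (node_dependencies_dic : List (String × List (String × String))) :
    List (String × List String) :=
  (enzymes_cases.foldl
    (fun (output : PySem.Dict String (List String)) an_enzyme_case =>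
      let present_enzyme := pvAPresent an_enzyme_case
      let new_sorted_case := sorted_cases.foldl
        (fun acc case =>
          let present_node := pvAPresent case
          if pvAkeepCase (PySem.Dict.mk node_dependencies_dic)
              present_enzyme present_node present_node
          then acc ++ [case] else acc)
        []
      output.insert an_enzyme_case new_sorted_case)
    PySem.Dict.empty).items

-- ===== PORT B =====
def pvBpresent (s : String) : PySem.Set String :=
  PySem.Set.ofList ((pvSplitTab s).filter (fun t => !PySem.Str.isIn "~" t))

def pvBreq (node_dependencies_dic : List (String × List (String × String)))
    (present : PySem.Set String) (n : String) : PySem.Set String :=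
  PySem.Set.ofList
    (((((PySem.Dict.mk node_dependencies_dic).get? n).getD []).filter
        (fun pt => pt.1 == "0" || PySem.Set.contains present pt.1)).map Prod.snd)

def pvBentry (node_dependencies_dic : List (String × List (String × String)))
    (case : String) : String × List (PySem.Set String) :=
  let present := pvBpresent case
  (case, present.map (pvBreq node_dependencies_dic present))

def new_sort_cases_for_enzymes_alt (enzymes_cases : List String) (sorted_cases : List String)
    (node_dependencies_dic : List (String × List (String × String))) :
    List (String × List String) :=
  let table := sorted_cases.map (pvBentry node_dependencies_dic)
  (enzymes_cases.foldl
    (fun (output : PySem.Dict String (List String)) an_enzyme_case =>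
      let present_enzyme := pvBpresent an_enzyme_case
      output.insert an_enzyme_case
        ((table.filter
            (fun ce => ce.2.all
              (fun s => s.any (fun e => PySem.Set.contains present_enzyme e)))).map Prod.fst))
    PySem.Dict.empty).items

-- ===== PRECONDITION & SPEC =====
-- Pre_ excludes inputs where some case in sorted_cases contains a present ('~'-free) node
-- that is not a key of node_dependencies_dic: there Python A raises KeyError (except when
-- enzymes_cases is empty, or set iteration order hits an unsatisfied node first, where the
-- value A returns is an accident of hash order), and B's precomputation pass raises KeyError.
def Pre_new_sort_cases_for_enzymes (enzymes_cases : List String) (sorted_cases : List String) (node_dependencies_dic : List (String × List (String × String))) : Prop :=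
  sorted_cases.all (fun case =>
    (pvSplitTab case).all (fun tok =>
      PySem.Str.isIn "~" tok || (PySem.Dict.mk node_dependencies_dic).contains tok)) = true
instance (enzymes_cases : List String) (sorted_cases : List String) (node_dependencies_dic : List (String × List (String × String))) : Decidable (Pre_new_sort_cases_for_enzymes enzymes_cases sorted_cases node_dependencies_dic) := by unfold Pre_new_sort_cases_for_enzymes; infer_instance

def pvWitness_new_sort_cases_for_enzymes : List String × List String × (List (String × List (String × String))) :=
  (["E1\tE2~"], ["a\tb~", "c"], [("a", [("0", "E1")]), ("c", [("a", "E1")])])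

def Spec_new_sort_cases_for_enzymes (enzymes_cases : List String) (sorted_cases : List String) (node_dependencies_dic : List (String × List (String × String))) (out : List (String × List String)) : Prop := out = new_sort_cases_for_enzymes_alt enzymes_cases sorted_cases node_dependencies_dic
instance (enzymes_cases : List String) (sorted_cases : List String) (node_dependencies_dic : List (String × List (String × String))) (out : List (String × List String)) : Decidable (Spec_new_sort_cases_for_enzymes enzymes_cases sorted_cases node_dependencies_dic out) := by unfold Spec_new_sort_cases_for_enzymes; infer_instance

-- ===== CLAIM (what is proved, stated in full; the proofs are below) =====
def Claim_equal_new_sort_cases_for_enzymes : Prop := ∀ (enzymes_cases : List String) (sorted_cases : List String) (node_dependencies_dic : List (String × List (String × String))), Dom_new_sort_cases_for_enzymes enzymes_cases sorted_cases node_dependencies_dic → Pre_new_sort_cases_for_enzymes enzymes_cases sorted_cases node_dependencies_dic → Spec_new_sort_cases_for_enzymes enzymes_cases sorted_cases node_dependencies_dic (new_sort_cases_for_enzymes enzymes_cases sorted_cases node_dependencies_dic)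

-- ===== LEMMAS AND PROOFS =====

-- a foldl that skips elements failing !p is a foldl over the filtered list
lemma pvFoldl_add_if (p : String → Bool) (l : List String) (acc : PySem.Set String) :
    l.foldl (fun a t => if p t then a else PySem.Set.add a t) acc
      = (l.filter (fun t => !p t)).foldl PySem.Set.add acc := by
  induction l generalizing acc with
  | nil => rfl
  | cons h t ih =>
    simp only [List.foldl_cons, List.filter_cons]
    cases hc : p h <;> simp [ih]

-- A's present-set loop builds the same set as B's ofList-of-filter comprehension
lemma pvPresent_eq (s : String) : pvAPresent s = pvBpresent s := by
  unfold pvAPresent pvBpresent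
  rw [pvFoldl_add_if, PySem.Set.ofList_eq_foldl]
  rfl

-- deduplication does not change an existence test
lemma pvAny_ofList (l : List String) (p : String → Bool) :
    (PySem.Set.ofList l).any p = l.any p := by
  apply Bool.eq_iff_iff.mpr
  rw [List.any_eq_true, List.any_eq_true]
  constructor <;> rintro ⟨x, hx, hp⟩
  · exact ⟨x, (PySem.Set.mem_ofList l x).mp hx, hp⟩
  · exact ⟨x, (PySem.Set.mem_ofList l x).mpr hx, hp⟩

-- A's dependency scan = "some candidate enzyme of B's reduced tuple list is present"
lemma pvHasParent_eq (pe pn : PySem.Set String) (deps : List (String × String)) :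
    pvAhasParent pe pn deps
      = ((deps.filter (fun pt => pt.1 == "0" || PySem.Set.contains pn pt.1)).map Prod.snd).any
          (fun e => PySem.Set.contains pe e) := by
  induction deps with
  | nil => rfl
  | cons d rest ih =>
    obtain ⟨p, e⟩ := d
    simp only [pvAhasParent, List.filter_cons]
    by_cases h0 : (p == "0") = true
    · cases hc : PySem.Set.contains pe e
      · simp [h0, ih]
        intro h
        exact absurd h (by simpa using hc)
      · simp [h0]
        exact Or.inl (by simpa using hc)
    · rw [Bool.not_eq_true] at h0
      cases hp : PySem.Set.contains pn p
      · simp [h0, ih]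
      · cases hc : PySem.Set.contains pe e
        · simp [h0, ih]
          intro h
          exact absurd h (by simpa using hc)
        · simp [h0]
          exact Or.inl (by simpa using hc)

-- A's per-case loop with break = "all present nodes have a parent"
lemma pvKeepCase_eq (dic : PySem.Dict String (List (String × String)))
    (pe pn : PySem.Set String) (nodes : List String) :
    pvAkeepCase dic pe pn nodes
      = nodes.all (fun n => pvAhasParent pe pn ((dic.get? n).getD [])) := by
  induction nodes with
  | nil => rfl
  | cons n rest ih =>
    simp only [pvAkeepCase, List.all_cons]
    cases h : pvAhasParent pe pn ((dic.get? n).getD []) <;> simp [ih]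

-- the two per-case keep conditions agree
lemma pvKeep_eq (dic : List (String × List (String × String))) (pe : PySem.Set String)
    (case : String) :
    pvAkeepCase (PySem.Dict.mk dic) pe (pvAPresent case) (pvAPresent case)
      = (pvBentry dic case).2.all (fun s => s.any (fun e => PySem.Set.contains pe e)) := by
  rw [pvKeepCase_eq, pvPresent_eq]
  unfold pvBentry
  simp only [List.all_map]
  have hfn : (fun n => pvAhasParent pe (pvBpresent case)
        (((PySem.Dict.mk dic).get? n).getD []))
      = ((fun s => s.any (fun e => PySem.Set.contains pe e)) ∘ pvBreq dic (pvBpresent case)) := by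
    funext n
    simp only [Function.comp]
    rw [pvHasParent_eq]
    unfold pvBreq
    rw [pvAny_ofList]
  rw [hfn]

-- the per-enzyme filtered lists agree
lemma pvInner_eq (dic : List (String × List (String × String))) (pe : PySem.Set String)
    (sorted_cases : List String) :
    sorted_cases.foldl
      (fun acc case =>
        if pvAkeepCase (PySem.Dict.mk dic) pe (pvAPresent case) (pvAPresent case)
        then acc ++ [case] else acc) []
      = ((sorted_cases.map (pvBentry dic)).filter
          (fun ce => ce.2.all (fun s => s.any (fun e => PySem.Set.contains pe e)))).map
          Prod.fst := by
  have h := PySem.List.foldl_append_if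
    (fun case => pvAkeepCase (PySem.Dict.mk dic) pe (pvAPresent case) (pvAPresent case))
    (id : String → String) sorted_cases []
  simp only [List.nil_append, id_eq] at h
  rw [h, List.filter_map, List.map_map]
  have hfst : (Prod.fst ∘ pvBentry dic) = id := by
    funext c; simp [pvBentry]
  rw [hfst]
  simp only [List.map_id]
  refine List.filter_congr ?_
  intro case _
  rw [pvKeep_eq]
  rfl

-- pointwise-equal folding functions give equal folds
lemma pvFoldl_fun_congr {α β : Type} (f g : β → α → β) (h : ∀ b a, f b a = g b a)
    (init : β) (l : List α) : l.foldl f init = l.foldl g init := by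
  have : f = g := funext fun b => funext fun a => h b a
  rw [this]

-- ===== VERDICT (by name: the statement is the Claim_ definition above) =====
theorem new_sort_cases_for_enzymes_spec : Claim_equal_new_sort_cases_for_enzymes := by
  intro enzymes_cases sorted_cases dic _ _
  unfold Spec_new_sort_cases_for_enzymes
  unfold new_sort_cases_for_enzymes new_sort_cases_for_enzymes_alt
  congr 1
  apply pvFoldl_fun_congr
  intro out ec
  dsimp only
  rw [pvPresent_eq ec, pvInner_eq]
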